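-- pv_equiv track=rewrite | github.com/ritianpig/spider | app15/ylbbj/zongyi.py | to_img
-- ===== SOURCE A (Python) =====
-- def to_img(listx):
-- 	d = []
-- 	e = []
--
-- 	for i in listx:
-- 		d.append(str(i))
-- 	for k in d:
-- 		if '<Element img' in k:
-- 			k = '[img]'
-- 		e.append(k)
-- 	id1 = [i for i,x in enumerate(e) if x=='[img]']
-- 	for x,y in zip(range(1,len(id1)+1),id1):
-- 		e[y] = '[img%s]'%(str(x))
-- 	listx = e
-- 	l = len(id1)
-- 	return listx,l
-- ===== SOURCE B (Python) =====
-- def to_img(listx):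
--     out = []
--     l = 0
--     for i in listx:
--         s = str(i)
--         if '<Element img' in s:
--             s = '[img]'
--         if s == '[img]':
--             l += 1
--             out.append('[img%s]' % (str(l)))
--         else:
--             out.append(s)
--     return out, l
-- ===== Notes on version B (the rewrite author's own statement) =====
-- stated objective: simpler
-- what changed: One loop with a running counter replaces A's four passes (copy, substitute, index-collect, zip-renumber), eliminating the d, e and id1 intermediate lists.
import Mathlib
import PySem

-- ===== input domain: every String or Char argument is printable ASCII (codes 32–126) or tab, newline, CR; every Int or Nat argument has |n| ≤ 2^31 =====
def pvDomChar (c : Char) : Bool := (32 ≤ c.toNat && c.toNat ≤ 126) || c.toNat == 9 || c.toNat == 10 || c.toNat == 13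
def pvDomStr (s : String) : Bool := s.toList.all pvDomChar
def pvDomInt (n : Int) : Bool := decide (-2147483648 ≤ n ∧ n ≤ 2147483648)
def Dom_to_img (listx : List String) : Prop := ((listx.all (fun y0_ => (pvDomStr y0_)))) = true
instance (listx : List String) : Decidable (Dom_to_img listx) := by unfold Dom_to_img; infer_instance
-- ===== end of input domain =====

-- B replaces A's four passes by one loop with a running counter (objective: simpler).

-- ===== PORT A =====
def to_img (listx : List String) : List String × Int :=
  -- for i in listx: d.append(str(i))   (str of a str is the string itself)
  let d := listx.foldl (fun acc i => acc ++ [i]) []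
  -- for k in d: if '<Element img' in k: k = '[img]'; e.append(k)
  let e := d.foldl (fun acc k =>
    acc ++ [if PySem.Str.isIn "<Element img" k then "[img]" else k]) []
  -- id1 = [i for i,x in enumerate(e) if x=='[img]']
  let id1 := ((PySem.List.enumerate e 0).filter (fun p => p.2 == "[img]")).map (·.1)
  -- for x,y in zip(range(1,len(id1)+1),id1): e[y] = '[img%s]'%(str(x))
  let e2 := (List.zip (PySem.List.pyRange 1 ((id1.length : Int) + 1) 1) id1).foldl
    (fun acc p => PySem.List.pySetD acc p.2 ("[img" ++ PySem.Int.toStr p.1 ++ "]")) e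
  (e2, (id1.length : Int))

-- ===== PORT B =====
def to_img_alt (listx : List String) : List String × Int :=
  listx.foldl (fun (st : List String × Int) i =>
    let s := if PySem.Str.isIn "<Element img" i then "[img]" else i
    if s == "[img]" then
      (st.1 ++ ["[img" ++ PySem.Int.toStr (st.2 + 1) ++ "]"], st.2 + 1)
    else
      (st.1 ++ [s], st.2)) ([], 0)

-- ===== PRECONDITION & SPEC =====
def Spec_to_img (listx : List String) (out : List String × Int) : Prop := out = to_img_alt listx
instance (listx : List String) (out : List String × Int) : Decidable (Spec_to_img listx out) := by unfold Spec_to_img; infer_instance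

-- ===== CLAIM (what is proved, stated in full; the proofs are below) =====
def Claim_equal_to_img : Prop := ∀ (listx : List String), Dom_to_img listx → Spec_to_img listx (to_img listx)

-- ===== LEMMAS AND PROOFS =====

-- the numbered-substitution result, as a recursive specification
def pvNum (c : Int) : List String → List String
  | [] => []
  | s :: rest =>
    if s = "[img]" then ("[img" ++ PySem.Int.toStr (c + 1) ++ "]") :: pvNum (c + 1) rest
    else s :: pvNum c rest

def pvSub (x : String) : String :=
  if PySem.Str.isIn "<Element img" x then "[img]" else x

def pvIds (e : List String) : List Int :=
  ((PySem.List.enumerate e 0).filter (fun p => p.2 == "[img]")).map (·.1)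

theorem pvIds_shift (e : List String) :
    ∀ s : Int, ((PySem.List.enumerate e s).filter (fun p => p.2 == "[img]")).map (·.1)
      = (pvIds e).map (· + s) := by
  induction e with
  | nil => intro s; simp [pvIds, PySem.List.enumerate_nil]
  | cons x rest ih =>
    intro s
    simp only [pvIds, PySem.List.enumerate_cons, List.filter_cons]
    by_cases hx : x = "[img]"
    · simp [hx, ih (s + 1), ih 1, List.map_map, Function.comp_def, pvIds]
      intro a b _ _
      omega
    · simp [hx, ih (s + 1), ih 1, List.map_map, Function.comp_def, pvIds]
      intro a b _ _
      omega

theorem pvIds_cons_img (rest : List String) :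
    pvIds ("[img]" :: rest) = 0 :: (pvIds rest).map (· + 1) := by
  simp [pvIds, PySem.List.enumerate_cons, pvIds_shift rest 1]

theorem pvIds_cons_not {x : String} (rest : List String) (hx : x ≠ "[img]") :
    pvIds (x :: rest) = (pvIds rest).map (· + 1) := by
  simp [pvIds, PySem.List.enumerate_cons, hx, pvIds_shift rest 1]

theorem pvIds_nonneg (e : List String) : ∀ i ∈ pvIds e, 0 ≤ i := by
  induction e with
  | nil => simp [pvIds, PySem.List.enumerate_nil]
  | cons x rest ih =>
    intro i hi
    by_cases hx : x = "[img]"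
    · subst hx; rw [pvIds_cons_img] at hi
      rw [List.mem_cons] at hi
      rcases hi with rfl | h
      · omega
      · simp only [List.mem_map] at h
        obtain ⟨j, hj, rfl⟩ := h
        have := ih j hj; omega
    · rw [pvIds_cons_not rest hx] at hi
      simp only [List.mem_map] at hi
      obtain ⟨j, hj, rfl⟩ := hi
      have := ih j hj; omega

-- folding pySetD over index-shifted pairs leaves the head alone
theorem pv_shiftfold :
    ∀ (ps : List (Int × Int)) (y : String) (xs : List String), (∀ p ∈ ps, 0 ≤ p.2) →
      (ps.map (fun p => (p.1, p.2 + 1))).foldl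
          (fun acc p => PySem.List.pySetD acc p.2 ("[img" ++ PySem.Int.toStr p.1 ++ "]")) (y :: xs)
        = y :: ps.foldl
            (fun acc p => PySem.List.pySetD acc p.2 ("[img" ++ PySem.Int.toStr p.1 ++ "]")) xs := by
  intro ps
  induction ps with
  | nil => simp
  | cons p ps ih =>
    intro y xs hnn
    have h2 : 0 ≤ p.2 := hnn p (by simp)
    have hstep : PySem.List.pySetD (y :: xs) (p.2 + 1) ("[img" ++ PySem.Int.toStr p.1 ++ "]")
        = y :: PySem.List.pySetD xs p.2 ("[img" ++ PySem.Int.toStr p.1 ++ "]") := by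
      rw [PySem.List.pySetD_of_nonneg (y :: xs) _ (by omega : (0:Int) ≤ p.2 + 1),
          PySem.List.pySetD_of_nonneg xs _ h2]
      have h3 : (p.2 + 1).toNat = p.2.toNat + 1 := by omega
      simp [h3]
    simp only [List.map_cons, List.foldl_cons, hstep]
    exact ih y _ (fun q hq => hnn q (by simp [hq]))

theorem pv_zipmap (a b : Int) (l : List Int) :
    List.zip (PySem.List.pyRange a b 1) (l.map (· + 1))
      = (List.zip (PySem.List.pyRange a b 1) l).map (fun p => (p.1, p.2 + 1)) := by
  rw [List.zip_map_right]
  congr 1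

-- A's zip-renumbering pass computes pvNum
theorem pv_updfold (e : List String) :
    ∀ c : Int,
      (List.zip (PySem.List.pyRange (c + 1) (c + 1 + ((pvIds e).length : Int)) 1) (pvIds e)).foldl
          (fun acc p => PySem.List.pySetD acc p.2 ("[img" ++ PySem.Int.toStr p.1 ++ "]")) e
        = pvNum c e := by
  induction e with
  | nil => intro c; simp [pvIds, PySem.List.enumerate_nil, pvNum]
  | cons x rest ih =>
    intro c
    have hnn := pvIds_nonneg rest
    by_cases hx : x = "[img]"
    · subst hx
      rw [pvIds_cons_img]
      simp only [List.length_cons, List.length_map, Nat.cast_add, Nat.cast_one]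
      rw [PySem.List.pyRange_one_cons (by
        have : (0:Int) ≤ ((pvIds rest).length : Int) := by positivity
        omega)]
      simp only [List.zip_cons_cons, List.foldl_cons]
      have h0 : PySem.List.pySetD ("[img]" :: rest) (0 : Int)
            ("[img" ++ PySem.Int.toStr (c + 1) ++ "]")
          = ("[img" ++ PySem.Int.toStr (c + 1) ++ "]") :: rest := by
        rw [PySem.List.pySetD_of_nonneg _ _ (by omega : (0:Int) ≤ 0)]
        rfl
      rw [h0]
      have hb : c + 1 + (((pvIds rest).length : Int) + 1) = (c + 1) + 1 + ((pvIds rest).length : Int) := by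
        ring
      rw [hb, pv_zipmap,
          pv_shiftfold _ _ _ (fun p hp => hnn p.2 (List.of_mem_zip hp).2), ih (c + 1)]
      simp [pvNum]
    · rw [pvIds_cons_not rest hx]
      simp only [List.length_map]
      rw [pv_zipmap,
          pv_shiftfold _ _ _ (fun p hp => hnn p.2 (List.of_mem_zip hp).2), ih c]
      simp [pvNum, hx]

-- B's single pass computes pvNum of the substituted list, plus its count
theorem pv_bfold (xs : List String) :
    ∀ (acc : List String) (c : Int),
      xs.foldl (fun (st : List String × Int) i =>
        let s := if PySem.Str.isIn "<Element img" i then "[img]" else i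
        if s == "[img]" then
          (st.1 ++ ["[img" ++ PySem.Int.toStr (st.2 + 1) ++ "]"], st.2 + 1)
        else
          (st.1 ++ [s], st.2)) (acc, c)
      = (acc ++ pvNum c (xs.map pvSub), c + ((pvIds (xs.map pvSub)).length : Int)) := by
  induction xs with
  | nil => intro acc c; simp [pvIds, PySem.List.enumerate_nil, pvNum]
  | cons x rest ih =>
    intro acc c
    simp only [List.foldl_cons, List.map_cons]
    by_cases hs : pvSub x = "[img]"
    · have h1 : (if PySem.Str.isIn "<Element img" x then "[img]" else x) = "[img]" := hs
      rw [hs, pvIds_cons_img]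
      simp only [h1, beq_self_eq_true, if_true, ih]
      simp only [pvNum, List.length_cons, List.length_map, Nat.cast_add,
        Nat.cast_one, Prod.mk.injEq]
      constructor
      · simp
      · ring
    · have hb : ((if PySem.Str.isIn "<Element img" x then "[img]" else x) == "[img]") = false := by
        simpa [pvSub] using hs
      rw [pvIds_cons_not (rest.map pvSub) hs]
      simp only [hb, Bool.false_eq_true, if_false, ih]
      have h2 : (if PySem.Str.isIn "<Element img" x then "[img]" else x) = pvSub x := rfl
      rw [h2]
      simp [pvNum, hs]

theorem to_img_spec : Claim_equal_to_img := by
  intro listx _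
  unfold Spec_to_img to_img to_img_alt
  have hd : listx.foldl (fun acc i => acc ++ [i]) ([] : List String) = listx := by
    simpa using PySem.List.foldl_append_singleton_eq_map id listx []
  have he : listx.foldl (fun acc k =>
      acc ++ [if PySem.Str.isIn "<Element img" k then "[img]" else k]) ([] : List String)
      = listx.map pvSub := by
    simpa [pvSub] using PySem.List.foldl_append_singleton_eq_map pvSub listx []
  simp only [hd, he]
  rw [pv_bfold listx [] 0]
  show ((List.zip (PySem.List.pyRange 1 (((pvIds (listx.map pvSub)).length : Int) + 1) 1)
          (pvIds (listx.map pvSub))).foldl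
        (fun acc p => PySem.List.pySetD acc p.2 ("[img" ++ PySem.Int.toStr p.1 ++ "]"))
        (listx.map pvSub),
      ((pvIds (listx.map pvSub)).length : Int)) = _
  have h := pv_updfold (listx.map pvSub) 0
  rw [show (0:Int) + 1 = 1 from by ring,
      Int.add_comm 1 ((pvIds (listx.map pvSub)).length : Int)] at h
  rw [h]
  simp
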